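-- pv_equiv track=rewrite | github.com/Nels2/VibeVoice-STT-Server | demo/server.py | _fallback_stream_chunks
-- ===== SOURCE A (Python) =====
-- from typing import List, Optional, Literal, Iterator
--
-- def _fallback_stream_chunks(text: str, target_chunk_size: int = 24) -> Iterator[str]:
--     words = text.split()
--     if not words:
--         return
--     chunk = ""
--     for word in words:
--         candidate = f"{chunk} {word}".strip() if chunk else word
--         if len(candidate) >= target_chunk_size and chunk:
--             yield chunk + " "
--             chunk = word
--         else:
--             chunk = candidate
--     if chunk:
--         yield chunk
-- ===== SOURCE B (Python) =====
-- def _fallback_stream_chunks(text, target_chunk_size=24):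
--     words = text.split()
--     while words:
--         n = 1
--         width = len(words[0])
--         while n < len(words) and width + 1 + len(words[n]) < target_chunk_size:
--             width += 1 + len(words[n])
--             n += 1
--         chunk = " ".join(words[:n])
--         words = words[n:]
--         yield chunk + (" " if words else "")
-- ===== Notes on version B (the rewrite author's own statement) =====
-- stated objective: alternative
-- what changed: Replaces A's single fold that grows a candidate string per word (with strip and an interleaved flush/yield) by a chunk-at-a-time structure: an outer loop per chunk whose inner loop only counts how many words fit using width arithmetic (never concatenating), then builds the chunk once with one space-join over a slice and advances by slicing.
import Mathlib
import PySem

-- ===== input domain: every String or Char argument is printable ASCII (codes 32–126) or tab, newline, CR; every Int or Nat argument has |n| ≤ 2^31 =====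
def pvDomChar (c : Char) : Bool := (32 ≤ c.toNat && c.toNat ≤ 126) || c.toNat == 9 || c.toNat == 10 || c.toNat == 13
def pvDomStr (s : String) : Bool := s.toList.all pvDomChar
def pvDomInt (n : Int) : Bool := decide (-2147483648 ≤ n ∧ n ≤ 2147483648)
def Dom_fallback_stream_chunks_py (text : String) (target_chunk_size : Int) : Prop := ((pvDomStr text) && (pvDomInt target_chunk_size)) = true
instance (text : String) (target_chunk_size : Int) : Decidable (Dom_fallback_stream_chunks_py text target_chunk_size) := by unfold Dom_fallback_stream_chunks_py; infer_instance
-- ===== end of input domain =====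

-- B restructures the task as an outer loop per chunk: an inner counting loop picks how many
-- words fit by width arithmetic, then ' '.join builds the chunk; same values, no speed claim.

-- ===== PORT A =====
-- loop body of A's for-loop (state = (yielded so far, chunk))
def fsc_stepA (t : Int) (st : List String × String) (word : String) : List String × String :=
  let candidate := if st.2 ≠ "" then PySem.Str.strip (st.2 ++ " " ++ word) else word
  if t ≤ PySem.Str.len candidate ∧ st.2 ≠ "" then (st.1 ++ [st.2 ++ " "], word)
  else (st.1, candidate)

def fallback_stream_chunks_py (text : String) (target_chunk_size : Int) : List String :=
  let words := PySem.Str.split₀ text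
  if words = [] then []
  else
    let st := words.foldl (fsc_stepA target_chunk_size) ([], "")
    if st.2 ≠ "" then st.1 ++ [st.2] else st.1

-- ===== PORT B =====
-- B's inner while-loop: how many FURTHER words (beyond the current width) fit strictly under target
def fscTake (t : Int) (width : Int) : List String → Nat
  | [] => 0
  | w :: rest =>
    if width + 1 + PySem.Str.len w < t then fscTake t (width + 1 + PySem.Str.len w) rest + 1
    else 0

-- B's outer while-loop: emit one chunk (join of the words taken), recurse on the rest
def fscEmit (t : Int) : List String → List String
  | [] => []
  | w :: rest =>
    let n := fscTake t (PySem.Str.len w) rest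
    let chunk := PySem.Str.join " " (w :: rest.take n)
    let rest' := rest.drop n
    (chunk ++ (if rest' = [] then "" else " ")) :: fscEmit t rest'
  termination_by l => l.length
  decreasing_by simp [List.length_drop]

def fallback_stream_chunks_py_alt (text : String) (target_chunk_size : Int) : List String :=
  fscEmit target_chunk_size (PySem.Str.split₀ text)

-- ===== PRECONDITION & SPEC =====
def Spec_fallback_stream_chunks_py (text : String) (target_chunk_size : Int) (out : List String) : Prop := out = fallback_stream_chunks_py_alt text target_chunk_size
instance (text : String) (target_chunk_size : Int) (out : List String) : Decidable (Spec_fallback_stream_chunks_py text target_chunk_size out) := by unfold Spec_fallback_stream_chunks_py; infer_instance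

-- ===== CLAIM =====
def Claim_equal_fallback_stream_chunks_py : Prop := ∀ (text : String) (target_chunk_size : Int), Dom_fallback_stream_chunks_py text target_chunk_size → Spec_fallback_stream_chunks_py text target_chunk_size (fallback_stream_chunks_py text target_chunk_size)

-- ===== LEMMAS AND PROOFS =====

-- a token produced by str.split(): nonempty, no whitespace characters
def fscWordOk (l : List Char) : Prop := l ≠ [] ∧ ∀ c ∈ l, PySem.Chars.isspace c = false

-- an accumulated chunk: nonempty, non-space first and last character
def fscChunkOk (l : List Char) : Prop :=
  (l.head?.all fun c => !PySem.Chars.isspace c) = true ∧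
  (l.getLast?.all fun c => !PySem.Chars.isspace c) = true ∧ l ≠ []

theorem fscWordOk_chunkOk {l : List Char} (h : fscWordOk l) : fscChunkOk l := by
  obtain ⟨hne, hall⟩ := h
  refine ⟨?_, ?_, hne⟩
  · cases l with
    | nil => simp
    | cons c cs => simp [hall c (by simp)]
  · cases hc : l.getLast? with
    | none => exact absurd (List.getLast?_eq_none_iff.mp hc) hne
    | some c => simp [hall c (List.mem_of_getLast? hc)]

theorem fscChunkOk_join {a b : List Char} (ha : fscChunkOk a) (hb : fscWordOk b) :
    fscChunkOk (a ++ ' ' :: b) := by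
  obtain ⟨ha1, _, hane⟩ := ha
  obtain ⟨hb1, hb2, hbne⟩ := fscWordOk_chunkOk hb
  refine ⟨?_, ?_, by simp⟩
  · rcases a with _ | ⟨c, cs⟩
    · exact absurd rfl hane
    · simpa using (by simpa using ha1)
  · cases hbl : b.getLast? with
    | none => exact absurd (List.getLast?_eq_none_iff.mp hbl) hbne
    | some c =>
      have h1 : (' ' :: b).getLast? = some c := by
        rw [show (' ' :: b) = [' '] ++ b from rfl, List.getLast?_append, hbl]; rfl
      rw [List.getLast?_append, h1]
      rw [hbl] at hb2
      simpa using hb2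

theorem fsc_strip_eq {s : String} (h : fscChunkOk s.toList) : PySem.Str.strip s = s := by
  obtain ⟨h1, h2, hne⟩ := h
  apply String.toList_inj.mp
  rw [PySem.Str.toList_strip]
  unfold PySem.Chars.strip PySem.Chars.lstrip PySem.Chars.rstrip
  have hl : s.toList.dropWhile PySem.Chars.isspace = s.toList := by
    rw [List.dropWhile_eq_self_iff]
    intro hl hx
    have h0 : s.toList.head? = some (s.toList[0]) := by
      rw [List.head?_eq_getElem?, List.getElem?_eq_getElem hl]
    rw [h0] at h1
    simp at h1
    simp [h1] at hx
  rw [hl]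
  have hr : s.toList.reverse.dropWhile PySem.Chars.isspace = s.toList.reverse := by
    rw [List.dropWhile_eq_self_iff]
    intro hl hx
    have h0 : s.toList.reverse.head? = some (s.toList.reverse[0]) := by
      rw [List.head?_eq_getElem?, List.getElem?_eq_getElem hl]
    rw [List.head?_reverse] at h0
    rw [h0] at h2
    simp at h2
    simp [h2] at hx
  rw [hr, List.reverse_reverse]

-- every token of Chars.split₀ is a nonempty whitespace-free word
theorem fsc_split₀_go_ok (l : List Char) :
    ∀ (cur : List Char) (acc : List (List Char)),
      (∀ c ∈ cur, PySem.Chars.isspace c = false) →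
      (∀ w ∈ acc, fscWordOk w) →
      ∀ w ∈ PySem.Chars.split₀.go l cur acc, fscWordOk w := by
  induction l with
  | nil =>
    intro cur acc hcur hacc w hw
    rw [PySem.Chars.split₀.go.eq_def] at hw
    by_cases h : cur = []
    · simp [h] at hw; exact hacc w (by simpa using hw)
    · simp [List.isEmpty_iff, h] at hw
      rcases hw with hw | hw
      · exact hacc w (by simpa using hw)
      · subst hw
        exact ⟨by simpa using h, fun c hc => hcur c (by simpa using hc)⟩
  | cons c rest ih =>
    intro cur acc hcur hacc w hw
    rw [PySem.Chars.split₀.go.eq_def] at hw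
    by_cases hsp : PySem.Chars.isspace c = true
    · by_cases h : cur = []
      · simp [hsp, h] at hw
        exact ih [] acc (by simp) hacc w hw
      · simp [hsp, List.isEmpty_iff, h] at hw
        refine ih [] _ (by simp) ?_ w hw
        intro v hv
        rcases List.mem_cons.mp hv with hv | hv
        · subst hv
          exact ⟨by simpa using h, fun d hd => hcur d (by simpa using hd)⟩
        · exact hacc v hv
    · simp [hsp] at hw
      refine ih (c :: cur) acc ?_ hacc w hw
      intro d hd
      rcases List.mem_cons.mp hd with hd | hd
      · subst hd; simpa using hsp
      · exact hcur d hd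

theorem fsc_token_ok {text : String} {w : String} (hw : w ∈ PySem.Str.split₀ text) :
    fscWordOk w.toList := by
  unfold PySem.Str.split₀ at hw
  rcases List.mem_map.mp hw with ⟨cs, hcs, rfl⟩
  have hok : fscWordOk cs :=
    fsc_split₀_go_ok text.toList [] [] (by simp) (by simp) cs hcs
  simpa using hok

theorem fsc_ne_empty {s : String} (h : s.toList ≠ []) : s ≠ "" := by
  intro hs; subst hs; simp at h

theorem fsc_len_append3 (a w : String) :
    PySem.Str.len (a ++ " " ++ w) = PySem.Str.len a + 1 + PySem.Str.len w := by
  rw [PySem.Str.len_append, PySem.Str.len_append]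
  have h1 : PySem.Str.len " " = 1 := by decide
  rw [h1]

theorem fsc_join_cons (a b : String) (l : List String) :
    PySem.Str.join " " (a :: b :: l) = PySem.Str.join " " ((a ++ " " ++ b) :: l) := by
  cases l with
  | nil =>
    apply String.toList_inj.mp
    simp [PySem.Str.join, PySem.Chars.join_cons_cons, PySem.Chars.join_singleton]
  | cons c l =>
    apply String.toList_inj.mp
    simp [PySem.Str.join, PySem.Chars.join_cons_cons]

theorem fsc_join_singleton (a : String) : PySem.Str.join " " [a] = a := by
  apply String.toList_inj.mp
  simp [PySem.Str.join, PySem.Chars.join_singleton]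

-- shared characterisation of the greedy grouping, mirroring A's branch structure
def fscChunks (t : Int) (cur : String) : List String → List String
  | [] => [cur]
  | w :: ws =>
    if t ≤ PySem.Str.len cur + 1 + PySem.Str.len w then (cur ++ " ") :: fscChunks t w ws
    else fscChunks t (cur ++ " " ++ w) ws

-- A's fold, finished the way A finishes it, equals fscChunks
theorem fsc_A_chunks (t : Int) (ws : List String) :
    ∀ (out : List String) (cur : String),
      fscChunkOk cur.toList → (∀ w ∈ ws, fscWordOk w.toList) →
      (let st := ws.foldl (fsc_stepA t) (out, cur);
       if st.2 ≠ "" then st.1 ++ [st.2] else st.1) = out ++ fscChunks t cur ws := by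
  induction ws with
  | nil =>
    intro out cur hcur _
    simp [fscChunks, fsc_ne_empty hcur.2.2]
  | cons w ws ih =>
    intro out cur hcur hws
    have hwok : fscWordOk w.toList := hws w (by simp)
    have hcand : fscChunkOk (cur ++ " " ++ w).toList := by
      have : (cur ++ " " ++ w).toList = cur.toList ++ ' ' :: w.toList := by
        simp [String.toList_append]
      rw [this]; exact fscChunkOk_join hcur hwok
    have hne : cur ≠ "" := fsc_ne_empty hcur.2.2
    have hstrip : PySem.Str.strip (cur ++ " " ++ w) = cur ++ " " ++ w := fsc_strip_eq hcand
    simp only [List.foldl_cons, fsc_stepA, ne_eq, hne, not_false_eq_true, if_true,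
      and_true, hstrip, fscChunks, fsc_len_append3]
    by_cases hlen : t ≤ PySem.Str.len cur + 1 + PySem.Str.len w
    · rw [if_pos hlen, if_pos hlen]
      have := ih (out ++ [cur ++ " "]) w (fscWordOk_chunkOk hwok)
        (fun v hv => hws v (by simp [hv]))
      simpa using this
    · rw [if_neg hlen, if_neg hlen]
      exact ih out (cur ++ " " ++ w) hcand (fun v hv => hws v (by simp [hv]))

theorem fscEmit_nil (t : Int) : fscEmit t [] = [] := by rw [fscEmit.eq_def]

-- B's emit equals fscChunks
theorem fsc_B_chunks (t : Int) (ws : List String) :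
    ∀ (cur : String), fscEmit t (cur :: ws) = fscChunks t cur ws := by
  induction ws with
  | nil =>
    intro cur
    rw [fscEmit.eq_def]
    simp [fscTake, fscChunks, fsc_join_singleton, fscEmit_nil]
  | cons w ws ih =>
    intro cur
    rw [fscEmit.eq_def]
    simp only [fscTake]
    by_cases hlen : PySem.Str.len cur + 1 + PySem.Str.len w < t
    · -- extend: the inner loop takes w, same chunk as starting from cur++" "++w
      simp only [hlen, if_true]
      have hn : ∀ n : Nat, (w :: ws).take (n + 1) = w :: ws.take n := fun n => rfl
      have hd : ∀ n : Nat, (w :: ws).drop (n + 1) = ws.drop n := fun n => rfl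
      rw [hn, hd, fsc_join_cons]
      have : fscChunks t cur (w :: ws) = fscChunks t (cur ++ " " ++ w) ws := by
        rw [fscChunks]
        rw [if_neg (by omega)]
      rw [this, ← ih (cur ++ " " ++ w)]
      conv_rhs => rw [fscEmit.eq_def]
      have harg : (cur.length : Int) + 1 + (w.length : Int) = (cur.length : Int) + ((w.length : Int) + 1) := by ring
      simp [harg]
    · -- flush: inner loop takes nothing, emit cur and recurse on w :: ws
      simp only [hlen, if_false]
      simp only [List.take_zero, List.drop_zero, fsc_join_singleton]
      have : fscChunks t cur (w :: ws) = (cur ++ " ") :: fscChunks t w ws := by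
        rw [fscChunks, if_pos (by omega)]
      rw [this, ← ih w]
      simp

-- ===== VERDICT =====
theorem fallback_stream_chunks_py_spec : Claim_equal_fallback_stream_chunks_py := by
  intro text t _
  unfold Spec_fallback_stream_chunks_py fallback_stream_chunks_py fallback_stream_chunks_py_alt
  cases hws : PySem.Str.split₀ text with
  | nil => simp [fscEmit_nil]
  | cons w ws =>
    have hwok : fscWordOk w.toList := fsc_token_ok (by rw [hws]; simp)
    have hwsok : ∀ v ∈ ws, fscWordOk v.toList := fun v hv =>
      fsc_token_ok (text := text) (by rw [hws]; simp [hv])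
    have hfirst : fsc_stepA t ([], "") w = ([], w) := by
      simp [fsc_stepA]
    have hA := fsc_A_chunks t ws [] w (fscWordOk_chunkOk hwok) hwsok
    rw [if_neg (by simp : ¬(w :: ws = []))]
    rw [fsc_B_chunks]
    simp only [List.foldl_cons, hfirst]
    simpa using hA
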